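-- pv_equiv track=rewrite | github.com/yassataiseer/youtube-coding-solutions | Breaking-down/j3.py | solve
-- ===== SOURCE A (Python) =====
-- def solve(data,location):
--     answer = []
--     prev_data = data[0:location]
--     next_data = data[location:len(data)]
--     for i in range(len(prev_data)):
--         answer.append(sum(prev_data[i:len(prev_data)]))
--     for i in range(len(next_data)):
--         answer.append(sum(next_data[0:i+1]))
--     return answer
-- ===== SOURCE B (Python) =====
-- def solve(data, location):
--     prev = data[0:location]
--     nxt = data[location:len(data)]
--     # suffix sums of prev by one backward accumulation
--     suf = []
--     acc = 0
--     for x in reversed(prev):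
--         acc += x
--         suf.append(acc)
--     suf.reverse()
--     # prefix sums of nxt by one forward accumulation
--     acc = 0
--     for x in nxt:
--         acc += x
--         suf.append(acc)
--     return suf
-- ===== Notes on version B (the rewrite author's own statement) =====
-- stated objective: faster
-- what changed: A recomputes sum() of a fresh slice for every index (quadratic); B makes one backward pass carrying a running accumulator for the suffix sums and one forward pass for the prefix sums.
import Mathlib
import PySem

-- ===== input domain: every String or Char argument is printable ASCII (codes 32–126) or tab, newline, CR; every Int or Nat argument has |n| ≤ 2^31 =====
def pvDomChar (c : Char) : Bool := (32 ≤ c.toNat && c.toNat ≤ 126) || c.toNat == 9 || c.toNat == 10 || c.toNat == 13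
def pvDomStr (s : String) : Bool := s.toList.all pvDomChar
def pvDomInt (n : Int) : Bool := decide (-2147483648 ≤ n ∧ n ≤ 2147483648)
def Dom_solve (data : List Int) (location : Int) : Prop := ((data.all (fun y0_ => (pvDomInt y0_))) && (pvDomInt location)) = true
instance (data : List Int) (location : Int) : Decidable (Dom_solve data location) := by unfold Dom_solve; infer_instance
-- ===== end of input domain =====

-- B replaces A's quadratic re-summation of every slice by a single backward
-- accumulation (suffix sums) and a single forward accumulation (prefix sums): O(n) vs O(n^2).

-- ===== PORT A =====
-- literal transliteration of A: two index loops, each appending sum of a fresh slice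
def solve (data : List Int) (location : Int) : List Int :=
  let prev_data := PySem.List.slice data (some 0) (some location)
  let next_data := PySem.List.slice data (some location) (some (data.length : Int))
  let answer : List Int :=
    (PySem.List.pyRange 0 (prev_data.length : Int) 1).foldl
      (fun ans i => ans ++ [(PySem.List.slice prev_data (some i) (some (prev_data.length : Int))).sum]) []
  (PySem.List.pyRange 0 (next_data.length : Int) 1).foldl
    (fun ans i => ans ++ [(PySem.List.slice next_data (some 0) (some (i + 1))).sum]) answer

-- ===== PORT B =====
-- literal transliteration of B: one backward pass (over reversed prev, then reverse),
-- one forward pass, each carrying a running accumulator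
def solve_alt (data : List Int) (location : Int) : List Int :=
  let prev := PySem.List.slice data (some 0) (some location)
  let nxt := PySem.List.slice data (some location) (some (data.length : Int))
  let p1 := prev.reverse.foldl
      (fun (p : Int × List Int) x => (p.1 + x, p.2 ++ [p.1 + x])) (0, [])
  let suf := p1.2.reverse
  let p2 := nxt.foldl
      (fun (p : Int × List Int) x => (p.1 + x, p.2 ++ [p.1 + x])) (0, suf)
  p2.2

-- ===== PRECONDITION & SPEC =====
def Spec_solve (data : List Int) (location : Int) (out : List Int) : Prop := out = solve_alt data location
instance (data : List Int) (location : Int) (out : List Int) : Decidable (Spec_solve data location out) := by unfold Spec_solve; infer_instance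

-- ===== CLAIM (what is proved, stated in full; the proofs are below) =====
def Claim_equal_solve : Prop := ∀ (data : List Int) (location : Int), Dom_solve data location → Spec_solve data location (solve data location)

-- ===== LEMMAS AND PROOFS =====

-- the accumulating fold computes prefix sums (offset a, appended to acc)
theorem pv_fold_prefix (l : List Int) (a : Int) (acc : List Int) :
    l.foldl (fun (p : Int × List Int) x => (p.1 + x, p.2 ++ [p.1 + x])) (a, acc)
      = (a + l.sum, acc ++ (List.range l.length).map (fun k => a + (l.take (k + 1)).sum)) := by
  induction l generalizing a acc with
  | nil => simp
  | cons x xs ih =>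
    simp only [List.foldl_cons, ih (a + x) (acc ++ [a + x])]
    refine Prod.ext (by simp; ring) ?_
    simp only [List.length_cons, List.range_succ_eq_map, List.map_cons, List.map_map]
    simp [List.append_assoc, Function.comp, add_assoc]

-- A's first loop value: suffix sums of prev, as a map over range
theorem pv_A_suffix (prev : List Int) :
    (PySem.List.pyRange 0 (prev.length : Int) 1).foldl
      (fun ans i => ans ++ [(PySem.List.slice prev (some i) (some (prev.length : Int))).sum]) []
    = (List.range prev.length).map (fun k => (prev.drop k).sum) := by
  rw [PySem.List.foldl_append_singleton_eq_map, PySem.List.pyRange_one]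
  simp only [sub_zero, Int.toNat_natCast, List.map_map, List.nil_append]
  refine List.map_congr_left (fun k hk => ?_)
  simp only [Function.comp, zero_add]
  rw [PySem.List.slice_natCast]
  rw [List.take_of_length_le (by simp)]

-- B's first part equals A's: reversed prefix sums of the reversed list are suffix sums
theorem pv_B_suffix (prev : List Int) :
    ((List.range prev.reverse.length).map
        (fun k => (0 : Int) + (prev.reverse.take (k + 1)).sum)).reverse
    = (List.range prev.length).map (fun k => (prev.drop k).sum) := by
  conv_lhs => rw [← List.map_reverse, List.length_reverse, List.range_eq_range',
    List.reverse_range', List.map_map]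
  refine List.map_congr_left (fun k hk => ?_)
  have hk' : k < prev.length := List.mem_range.mp hk
  simp only [Function.comp, zero_add]
  rw [List.take_reverse, List.sum_reverse]
  congr 2
  omega

theorem pv_core (prev nxt : List Int) :
    (PySem.List.pyRange 0 (nxt.length : Int) 1).foldl
      (fun ans i => ans ++ [(PySem.List.slice nxt (some 0) (some (i + 1))).sum])
      ((PySem.List.pyRange 0 (prev.length : Int) 1).foldl
        (fun ans i => ans ++ [(PySem.List.slice prev (some i) (some (prev.length : Int))).sum]) [])
    = (nxt.foldl (fun (p : Int × List Int) x => (p.1 + x, p.2 ++ [p.1 + x]))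
        (0, (prev.reverse.foldl (fun (p : Int × List Int) x => (p.1 + x, p.2 ++ [p.1 + x]))
              (0, [])).2.reverse)).2 := by
  rw [pv_fold_prefix, pv_fold_prefix, pv_A_suffix]
  rw [PySem.List.foldl_append_singleton_eq_map, PySem.List.pyRange_one]
  simp only [sub_zero, Int.toNat_natCast, List.map_map, List.nil_append]
  rw [pv_B_suffix]
  congr 1
  refine List.map_congr_left (fun k hk => ?_)
  simp only [Function.comp, zero_add]
  rw [PySem.List.slice_zero_start]
  have : ((k : Int) + 1) = ((k + 1 : Nat) : Int) := by push_cast; ring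
  rw [this, PySem.List.slice_to_natCast]

theorem solve_eq (data : List Int) (location : Int) :
    solve data location = solve_alt data location := by
  unfold solve solve_alt
  exact pv_core _ _

-- ===== VERDICT (by name: the statement is the Claim_ definition above) =====
theorem solve_spec : Claim_equal_solve := by
  intro data location _
  unfold Spec_solve
  exact solve_eq data location
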